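-- pv_equiv track=rewrite | github.com/laviniakd/religion_in_congress | build/lib/references/memetracker_utils.py | has_k_word_overlap
-- ===== SOURCE A (Python) =====
-- def has_k_word_overlap(p_tokens, q_tokens, k):
--     p_length = len(p_tokens)
--     q_length = len(q_tokens)
--
--     for i in range(p_length - k + 1):
--         p_k_sub = p_tokens[i:i+k]
--         for j in range(q_length - k + 1):
--             q_k_sub = q_tokens[j:j+k]
--             if p_k_sub == q_k_sub:
--                 return True
--     return False
-- ===== SOURCE B (Python) =====
-- def has_k_word_overlap(p_tokens, q_tokens, k):
--     if k <= 0: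
--         # the k-gram taken at the very end of each list is empty, so the empty
--         # gram is always shared
--         return True
--     p_grams = {tuple(p_tokens[i:i+k]) for i in range(len(p_tokens) - k + 1)}
--     return any(tuple(q_tokens[j:j+k]) in p_grams
--                for j in range(len(q_tokens) - k + 1))
-- ===== Notes on version B (the rewrite author's own statement) =====
-- stated objective: faster
-- what changed: Replaced the nested scan comparing every p k-gram with every q k-gram by building a hash set of p's k-grams once and doing a single membership pass over q's k-grams.
import Mathlib
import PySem

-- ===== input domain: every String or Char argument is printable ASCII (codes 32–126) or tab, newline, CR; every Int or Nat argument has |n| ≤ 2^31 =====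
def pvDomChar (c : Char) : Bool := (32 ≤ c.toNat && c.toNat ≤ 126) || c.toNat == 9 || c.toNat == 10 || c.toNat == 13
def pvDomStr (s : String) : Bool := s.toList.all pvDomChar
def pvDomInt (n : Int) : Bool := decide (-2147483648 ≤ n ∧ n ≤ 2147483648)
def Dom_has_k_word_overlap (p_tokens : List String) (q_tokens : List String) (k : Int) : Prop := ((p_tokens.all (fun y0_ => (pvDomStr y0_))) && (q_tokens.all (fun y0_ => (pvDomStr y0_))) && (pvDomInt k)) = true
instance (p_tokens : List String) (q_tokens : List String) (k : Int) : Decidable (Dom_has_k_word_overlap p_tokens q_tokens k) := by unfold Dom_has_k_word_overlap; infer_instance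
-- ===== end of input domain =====

-- B replaces A's nested quadratic scan with a precomputed set of p's k-grams and a single
-- membership pass over q's k-grams (alternative algorithm; same return value).


-- ===== PORT A =====
-- A's nested for-loops with early 'return True', as while-style recursions (early exit kept).
def pvInnerA (q_tokens p_k_sub : List String) (k bound j : Int) : Bool :=
  if h : j < bound then
    let q_k_sub := PySem.List.slice q_tokens (some j) (some (j + k))
    if p_k_sub == q_k_sub then true else pvInnerA q_tokens p_k_sub k bound (j + 1)
  else false
termination_by (bound - j).toNat
decreasing_by omega

def pvOuterA (p_tokens q_tokens : List String) (k boundP boundQ i : Int) : Bool :=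
  if h : i < boundP then
    let p_k_sub := PySem.List.slice p_tokens (some i) (some (i + k))
    if pvInnerA q_tokens p_k_sub k boundQ 0 then true
    else pvOuterA p_tokens q_tokens k boundP boundQ (i + 1)
  else false
termination_by (boundP - i).toNat
decreasing_by omega

def has_k_word_overlap (p_tokens : List String) (q_tokens : List String) (k : Int) : Bool :=
  let p_length : Int := p_tokens.length
  let q_length : Int := q_tokens.length
  pvOuterA p_tokens q_tokens k (p_length - k + 1) (q_length - k + 1) 0

-- ===== PORT B =====
-- Port of B: for k ≤ 0 the empty gram is always shared; otherwise build the set of p's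
-- k-grams once and do a single membership pass over q's k-grams.
def has_k_word_overlap_alt (p_tokens : List String) (q_tokens : List String) (k : Int) : Bool :=
  if k ≤ 0 then true
  else
    let p_grams : PySem.Set (List String) :=
      PySem.Set.ofList ((PySem.List.pyRange 0 ((p_tokens.length : Int) - k + 1) 1).map
        (fun i => PySem.List.slice p_tokens (some i) (some (i + k))))
    (PySem.List.pyRange 0 ((q_tokens.length : Int) - k + 1) 1).any (fun j =>
      PySem.Set.contains p_grams (PySem.List.slice q_tokens (some j) (some (j + k))))

-- ===== PRECONDITION & SPEC =====
def Spec_has_k_word_overlap (p_tokens : List String) (q_tokens : List String) (k : Int) (out : Bool) : Prop := out = has_k_word_overlap_alt p_tokens q_tokens k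
instance (p_tokens : List String) (q_tokens : List String) (k : Int) (out : Bool) : Decidable (Spec_has_k_word_overlap p_tokens q_tokens k out) := by unfold Spec_has_k_word_overlap; infer_instance

-- ===== CLAIM (what is proved, stated in full; the proofs are below) =====
def Claim_equal_has_k_word_overlap : Prop := ∀ (p_tokens : List String) (q_tokens : List String) (k : Int), Dom_has_k_word_overlap p_tokens q_tokens k → Spec_has_k_word_overlap p_tokens q_tokens k (has_k_word_overlap p_tokens q_tokens k)

-- ===== LEMMAS AND PROOFS =====

theorem pvSlice_nil_of_le (xs : List String) (a b : Int) (h : (xs.length : Int) <= a) :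
    PySem.List.slice xs (some a) (some b) = [] := by
  simp only [PySem.List.slice, PySem.List.clampIdx]
  split_ifs <;> simp_all <;> omega

theorem pvInnerA_eq (q_tokens p_k_sub : List String) (k bound j : Int) :
    pvInnerA q_tokens p_k_sub k bound j =
      ((PySem.List.pyRange j bound 1).any fun j2 =>
        p_k_sub == PySem.List.slice q_tokens (some j2) (some (j2 + k))) := by
  fun_induction pvInnerA with
  | case1 j h hsub heq =>
    rw [PySem.List.pyRange_one_cons h]; simp; exact Or.inl (beq_iff_eq.mp heq)
  | case2 j h hsub hne ih =>
    rw [PySem.List.pyRange_one_cons h]; simp only [List.any_cons]; rw [ih]; simp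
    intro hc; exact absurd (beq_iff_eq.mpr hc) hne
  | case3 j h =>
    rw [PySem.List.pyRange_one_eq_nil (by omega)]; simp

theorem pvOuterA_eq (p_tokens q_tokens : List String) (k boundP boundQ i : Int) :
    pvOuterA p_tokens q_tokens k boundP boundQ i =
      ((PySem.List.pyRange i boundP 1).any fun i2 =>
        pvInnerA q_tokens (PySem.List.slice p_tokens (some i2) (some (i2 + k))) k boundQ 0) := by
  fun_induction pvOuterA with
  | case1 i h hsub heq =>
    rw [PySem.List.pyRange_one_cons h]; simp; exact Or.inl heq
  | case2 i h hsub hne ih =>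
    rw [PySem.List.pyRange_one_cons h]; simp only [List.any_cons]; rw [ih]; simp
    intro hc; exact absurd hc hne
  | case3 i h =>
    rw [PySem.List.pyRange_one_eq_nil (by omega)]; simp

-- ===== VERDICT (by name: the statement is the Claim_ definition above) =====
theorem has_k_word_overlap_spec : Claim_equal_has_k_word_overlap := by
  intro p_tokens q_tokens k _
  unfold Spec_has_k_word_overlap has_k_word_overlap has_k_word_overlap_alt
  rw [pvOuterA_eq]
  by_cases hk : k <= 0
  · -- both sides are true: i = len p, j = len q give the shared empty gram
    rw [if_pos hk, Bool.eq_iff_iff]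
    simp only [List.any_eq_true, pvInnerA_eq, pysem, beq_iff_eq]
    refine ⟨fun _ => trivial, fun _ => ?_⟩
    refine ⟨(p_tokens.length : Int), by omega, (q_tokens.length : Int), by omega, ?_⟩
    rw [pvSlice_nil_of_le p_tokens _ _ (by omega), pvSlice_nil_of_le q_tokens _ _ (by omega)]
  · rw [if_neg hk, Bool.eq_iff_iff]
    simp only [List.any_eq_true, pvInnerA_eq, PySem.Set.contains, pysem, List.mem_map,
      beq_iff_eq, List.contains_eq_mem, decide_eq_true_eq]
    tauto
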